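-- pv_equiv track=rewrite | github.com/harukaeru/CompetitiveProgramming | abc275/D/main.py | f
-- ===== SOURCE A (Python) =====
-- cache = {}
--
-- def f(k):
--   if k == 0:
--     return 1
--   if cache.get(k):
--     return cache[k]
--
--   ret = f(k // 2) + f(k // 3)
--   cache[k] = ret
--   return ret
-- ===== SOURCE B (Python) =====
-- # Iterative re-implementation: collect the finitely many values reachable from k
-- # via repeated //2 and //3 (they are all of the form k // (2**a * 3**b)), then
-- # fill a memo table bottom-up in increasing order.  No recursion, no global cache.
-- def f(k):
--     vals = {0}
--     v = k
--     while v: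
--         w = v
--         while w:
--             vals.add(w)
--             w //= 3
--         v //= 2
--     memo = {}
--     for x in sorted(vals):
--         memo[x] = 1 if x == 0 else memo[x // 2] + memo[x // 3]
--     return memo[k]
-- ===== Notes on version B (the rewrite author's own statement) =====
-- stated objective: alternative
-- what changed: Replaces A's top-down recursion with a global memo dict by an explicit bottom-up dynamic program: two nested loops collect the finitely many reachable values k//(2**a*3**b) into a set, which is sorted and a memo table is filled in increasing order, so no recursion and no shared mutable cache are needed.
import Mathlib
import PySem

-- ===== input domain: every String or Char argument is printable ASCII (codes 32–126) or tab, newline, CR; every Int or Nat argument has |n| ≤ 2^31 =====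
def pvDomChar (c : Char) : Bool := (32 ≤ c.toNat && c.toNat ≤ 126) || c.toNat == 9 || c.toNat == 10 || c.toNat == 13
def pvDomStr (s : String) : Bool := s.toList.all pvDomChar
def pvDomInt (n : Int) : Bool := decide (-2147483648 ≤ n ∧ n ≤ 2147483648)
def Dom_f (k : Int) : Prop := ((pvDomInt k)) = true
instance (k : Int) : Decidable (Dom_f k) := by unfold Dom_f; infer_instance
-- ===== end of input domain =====

-- B replaces A's recursion-with-global-memo by an explicit bottom-up DP over the
-- (finitely many) reachable values k//(2^a*3^b); equivalence proved for k ≥ 0.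
-- A's global cache never changes A's returned value, so the port of A computes the
-- recurrence directly (return value only; B performs no shared-cache mutation).

-- ===== PORT A =====
-- For k < 0 the Python recurses forever (f(k//2) with k//2 < 0); the 'k < 0'
-- branch below exists only to make the Lean function total and lies outside Pre_f.
def f (k : Int) : Int :=
  if k = 0 then 1
  else if k < 0 then 0
  else f (PySem.Int.floordiv k 2) + f (PySem.Int.floordiv k 3)
termination_by k.toNat
decreasing_by
  · rw [PySem.Int.floordiv_eq_ediv_of_pos (by norm_num)]; omega
  · rw [PySem.Int.floordiv_eq_ediv_of_pos (by norm_num)]; omega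

-- ===== PORT B =====
-- inner loop 'while w: vals.add(w); w //= 3' (the w < 0 branch is a totality
-- guard only: Python loops forever there, outside Pre_f)
def fAltChain3 (w : Int) (s : PySem.Set Int) : PySem.Set Int :=
  if w = 0 then s
  else if w < 0 then s
  else fAltChain3 (PySem.Int.floordiv w 3) (PySem.Set.add s w)
termination_by w.toNat
decreasing_by rw [PySem.Int.floordiv_eq_ediv_of_pos (by norm_num)]; omega

-- outer loop 'while v: (inner loop); v //= 2' (same totality guard for v < 0)
def fAltChain2 (v : Int) (s : PySem.Set Int) : PySem.Set Int :=
  if v = 0 then s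
  else if v < 0 then s
  else fAltChain2 (PySem.Int.floordiv v 2) (fAltChain3 v s)
termination_by v.toNat
decreasing_by rw [PySem.Int.floordiv_eq_ediv_of_pos (by norm_num)]; omega

def f_alt (k : Int) : Int :=
  let vals := fAltChain2 k (PySem.Set.ofList [0])
  -- 'for x in sorted(vals): memo[x] = 1 if x == 0 else memo[x//2] + memo[x//3]'
  -- memo[x//2], memo[x//3], memo[k] are always present for k ≥ 0 (proved below),
  -- so getD is exact there
  let memo := (PySem.List.sorted vals (fun x => x) false).foldl
    (fun d x => d.insert x (if x = 0 then (1 : Int)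
      else d.getD (PySem.Int.floordiv x 2) 0 + d.getD (PySem.Int.floordiv x 3) 0))
    PySem.Dict.empty
  memo.getD k 0

-- ===== PRECONDITION & SPEC =====
-- Pre_f excludes k < 0, where the Python A never returns (unbounded recursion,
-- RecursionError) — and B's Python loops forever there too.
def Pre_f (k : Int) : Prop := 0 ≤ k
instance (k : Int) : Decidable (Pre_f k) := by unfold Pre_f; infer_instance
def pvWitness_f : Int := 12
def Spec_f (k : Int) (out : Int) : Prop := out = f_alt k
instance (k : Int) (out : Int) : Decidable (Spec_f k out) := by unfold Spec_f; infer_instance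

-- ===== CLAIM (what is proved, stated in full; the proofs are below) =====
def Claim_equal_f : Prop := ∀ (k : Int), Dom_f k → Pre_f k → Spec_f k (f k)

-- ===== LEMMAS AND PROOFS =====

theorem fd2_eq (x : Int) : PySem.Int.floordiv x 2 = x / 2 :=
  PySem.Int.floordiv_eq_ediv_of_pos (by norm_num)
theorem fd3_eq (x : Int) : PySem.Int.floordiv x 3 = x / 3 :=
  PySem.Int.floordiv_eq_ediv_of_pos (by norm_num)

theorem f_zero : f 0 = 1 := by rw [f]; norm_num
theorem f_of_pos (k : Int) (h : 0 < k) :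
    f k = f (PySem.Int.floordiv k 2) + f (PySem.Int.floordiv k 3) := by
  rw [f]; rw [if_neg (by omega), if_neg (by omega)]

-- pure description of the set fAltChain3 / fAltChain2 collect (proof helpers)
def chainL3 (w : Int) : List Int :=
  if w = 0 then [] else if w < 0 then [] else w :: chainL3 (PySem.Int.floordiv w 3)
termination_by w.toNat
decreasing_by rw [fd3_eq]; omega

def chainL2 (v : Int) : List Int :=
  if v = 0 then [] else if v < 0 then [] else chainL3 v ++ chainL2 (PySem.Int.floordiv v 2)
termination_by v.toNat
decreasing_by rw [fd2_eq]; omega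

theorem mem_fAltChain3 (w : Int) (s : PySem.Set Int) (x : Int) :
    x ∈ fAltChain3 w s ↔ x ∈ s ∨ x ∈ chainL3 w := by
  fun_induction fAltChain3 w s
  · rw [chainL3]; simp_all
  · rw [chainL3]; simp_all
  · next w s h h' ih =>
      rw [chainL3, if_neg h, if_neg h', ih]
      simp [PySem.Set.mem_add]
      tauto

theorem mem_fAltChain2 (v : Int) (s : PySem.Set Int) (x : Int) :
    x ∈ fAltChain2 v s ↔ x ∈ s ∨ x ∈ chainL2 v := by
  fun_induction fAltChain2 v s
  · rw [chainL2]; simp_all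
  · rw [chainL2]; simp_all
  · next v s h h' ih =>
      rw [chainL2, if_neg h, if_neg h', ih, mem_fAltChain3]
      simp
      tauto

theorem nodup_fAltChain3 (w : Int) (s : PySem.Set Int) (hs : s.Nodup) :
    (fAltChain3 w s).Nodup := by
  fun_induction fAltChain3 w s <;> try assumption
  next w s h h' ih => exact ih (PySem.Set.nodup_add s w hs)

theorem nodup_fAltChain2 (v : Int) (s : PySem.Set Int) (hs : s.Nodup) :
    (fAltChain2 v s).Nodup := by
  fun_induction fAltChain2 v s <;> try assumption
  next v s h h' ih => exact ih (nodup_fAltChain3 v s hs)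

theorem chainL3_pos (w : Int) : ∀ x ∈ chainL3 w, 0 < x := by
  fun_induction chainL3 w
  · simp
  · simp
  · next w h h' ih =>
      intro x hx
      rcases List.mem_cons.mp hx with rfl | hx
      · omega
      · exact ih x hx

theorem chainL3_tail_subset (w : Int) (hw : 0 ≤ w) :
    chainL3 (PySem.Int.floordiv w 3) ⊆ chainL3 w := by
  by_cases h0 : w = 0
  · subst h0
    have h : PySem.Int.floordiv (0 : Int) 3 = 0 := by decide
    rw [h]
    exact List.Subset.refl _
  · conv_rhs => rw [chainL3]
    rw [if_neg h0, if_neg (by omega)]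
    exact List.subset_cons_of_subset _ (List.Subset.refl _)

theorem chainL3_self (w : Int) (hw : 0 < w) : w ∈ chainL3 w := by
  rw [chainL3, if_neg (by omega), if_neg (by omega)]; exact List.mem_cons_self ..

theorem chainL3_closed3 (w : Int) : ∀ x ∈ chainL3 w,
    PySem.Int.floordiv x 3 = 0 ∨ PySem.Int.floordiv x 3 ∈ chainL3 w := by
  fun_induction chainL3 w
  · simp
  · simp
  · next w h h' ih =>
      intro x hx
      rcases List.mem_cons.mp hx with rfl | hx
      · by_cases hz : PySem.Int.floordiv x 3 = 0
        · exact Or.inl hz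
        · refine Or.inr (List.mem_cons_of_mem _ ?_)
          exact chainL3_self _ (by rw [fd3_eq] at hz ⊢; omega)
      · rcases ih x hx with hz | hmem
        · exact Or.inl hz
        · exact Or.inr (List.mem_cons_of_mem _ hmem)

theorem fd_comm32 (w : Int) :
    PySem.Int.floordiv (PySem.Int.floordiv w 3) 2
      = PySem.Int.floordiv (PySem.Int.floordiv w 2) 3 := by
  rw [fd3_eq, fd2_eq, fd2_eq, fd3_eq]; omega

theorem chainL3_closed2 (w : Int) : ∀ x ∈ chainL3 w,
    PySem.Int.floordiv x 2 = 0 ∨ PySem.Int.floordiv x 2 ∈ chainL3 (PySem.Int.floordiv w 2) := by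
  fun_induction chainL3 w
  · simp
  · simp
  · next w h h' ih =>
      intro x hx
      rcases List.mem_cons.mp hx with rfl | hx
      · by_cases hz : PySem.Int.floordiv x 2 = 0
        · exact Or.inl hz
        · refine Or.inr (chainL3_self _ ?_)
          rw [fd2_eq] at hz ⊢; omega
      · rcases ih x hx with hz | hmem
        · exact Or.inl hz
        · refine Or.inr ?_
          rw [fd_comm32] at hmem
          exact chainL3_tail_subset (PySem.Int.floordiv w 2)
            (by rw [fd2_eq]; omega) hmem

theorem chainL2_pos (v : Int) : ∀ x ∈ chainL2 v, 0 < x := by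
  fun_induction chainL2 v
  · simp
  · simp
  · next v h h' ih =>
      intro x hx
      rcases List.mem_append.mp hx with hx | hx
      · exact chainL3_pos v x hx
      · exact ih x hx

theorem chainL2_self (v : Int) (hv : 0 < v) : v ∈ chainL2 v := by
  rw [chainL2, if_neg (by omega), if_neg (by omega)]
  exact List.mem_append_left _ (chainL3_self v hv)

theorem chainL2_closed3 (v : Int) : ∀ x ∈ chainL2 v,
    PySem.Int.floordiv x 3 = 0 ∨ PySem.Int.floordiv x 3 ∈ chainL2 v := by
  fun_induction chainL2 v
  · simp
  · simp
  · next v h h' ih =>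
      intro x hx
      rcases List.mem_append.mp hx with hx | hx
      · rcases chainL3_closed3 v x hx with hz | hmem
        · exact Or.inl hz
        · exact Or.inr (List.mem_append_left _ hmem)
      · rcases ih x hx with hz | hmem
        · exact Or.inl hz
        · exact Or.inr (List.mem_append_right _ hmem)

theorem chainL2_closed2 (v : Int) : ∀ x ∈ chainL2 v,
    PySem.Int.floordiv x 2 = 0 ∨ PySem.Int.floordiv x 2 ∈ chainL2 v := by
  fun_induction chainL2 v
  · simp
  · simp
  · next v h h' ih =>
      intro x hx
      rcases List.mem_append.mp hx with hx | hx
      · rcases chainL3_closed2 v x hx with hz | hmem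
        · exact Or.inl hz
        · refine Or.inr (List.mem_append_right _ ?_)
          by_cases h2 : PySem.Int.floordiv v 2 = 0
          · rw [h2, chainL3] at hmem; simp at hmem
          · rw [chainL2, if_neg h2, if_neg (by rw [fd2_eq] at h2 ⊢; omega)]
            exact List.mem_append_left _ hmem
      · rcases ih x hx with hz | hmem
        · exact Or.inl hz
        · exact Or.inr (List.mem_append_right _ hmem)

-- the DP fold fills the memo with f's values, provided children come first
theorem fold_correct :
    ∀ (L : List Int) (d : PySem.Dict Int Int),
    L.Pairwise (· < ·) →
    (∀ x ∈ L, 0 ≤ x) →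
    (∀ x ∈ L, x ≠ 0 →
      ((PySem.Int.floordiv x 2 ∈ L ∧ PySem.Int.floordiv x 2 < x)
        ∨ d.get? (PySem.Int.floordiv x 2) = some (f (PySem.Int.floordiv x 2))) ∧
      ((PySem.Int.floordiv x 3 ∈ L ∧ PySem.Int.floordiv x 3 < x)
        ∨ d.get? (PySem.Int.floordiv x 3) = some (f (PySem.Int.floordiv x 3)))) →
    ∀ y, (y ∈ L ∨ d.get? y = some (f y)) →
    (L.foldl (fun d x => d.insert x (if x = 0 then (1 : Int)
        else d.getD (PySem.Int.floordiv x 2) 0 + d.getD (PySem.Int.floordiv x 3) 0)) d).get? y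
      = some (f y) := by
  intro L
  induction L with
  | nil =>
      intro d _ _ _ y hy
      rcases hy with hy | hy
      · simp at hy
      · simpa using hy
  | cons h t ih =>
      intro d hpw hnn hcl y hy
      have hgt : ∀ z ∈ t, h < z := fun z hz => List.rel_of_pairwise_cons hpw hz
      have hval : (d.insert h (if h = 0 then (1 : Int)
          else d.getD (PySem.Int.floordiv h 2) 0 + d.getD (PySem.Int.floordiv h 3) 0)).get? h
          = some (f h) := by
        rw [PySem.Dict.get?_insert_self]
        by_cases h0 : h = 0
        · subst h0; simp [f_zero]
        · have hpos : 0 < h := lt_of_le_of_ne (hnn h (List.mem_cons_self ..)) (Ne.symm h0)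
          rcases hcl h (List.mem_cons_self ..) h0 with ⟨hc2, hc3⟩
          have h2 : d.get? (PySem.Int.floordiv h 2) = some (f (PySem.Int.floordiv h 2)) := by
            rcases hc2 with ⟨hmem, hlt⟩ | hd
            · exfalso
              rcases List.mem_cons.mp hmem with heq | hmem'
              · omega
              · exact absurd (hgt _ hmem') (by omega)
            · exact hd
          have h3 : d.get? (PySem.Int.floordiv h 3) = some (f (PySem.Int.floordiv h 3)) := by
            rcases hc3 with ⟨hmem, hlt⟩ | hd
            · exfalso
              rcases List.mem_cons.mp hmem with heq | hmem'
              · omega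
              · exact absurd (hgt _ hmem') (by omega)
            · exact hd
          rw [if_neg h0]
          simp only [PySem.Dict.getD_eq_get?_getD, h2, h3, Option.getD_some]
          rw [← f_of_pos h hpos]
      set d' := d.insert h (if h = 0 then (1 : Int)
          else d.getD (PySem.Int.floordiv h 2) 0 + d.getD (PySem.Int.floordiv h 3) 0) with hd'
      have hpres : ∀ z, d.get? z = some (f z) → d'.get? z = some (f z) := by
        intro z hz
        rw [hd', PySem.Dict.get?_insert]
        split
        · next heq => subst heq; rw [← hval, hd', PySem.Dict.get?_insert_self]
        · exact hz
      simp only [List.foldl_cons]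
      refine ih d' (List.Pairwise.of_cons hpw) (fun x hx => hnn x (List.mem_cons_of_mem _ hx)) ?_ y ?_
      · intro x hx hx0
        rcases hcl x (List.mem_cons_of_mem _ hx) hx0 with ⟨hc2, hc3⟩
        constructor
        · rcases hc2 with ⟨hmem, hlt⟩ | hd
          · rcases List.mem_cons.mp hmem with heq | hmem'
            · exact Or.inr (by rw [heq, hval])
            · exact Or.inl ⟨hmem', hlt⟩
          · exact Or.inr (hpres _ hd)
        · rcases hc3 with ⟨hmem, hlt⟩ | hd
          · rcases List.mem_cons.mp hmem with heq | hmem'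
            · exact Or.inr (by rw [heq, hval])
            · exact Or.inl ⟨hmem', hlt⟩
          · exact Or.inr (hpres _ hd)
      · rcases hy with hy | hy
        · rcases List.mem_cons.mp hy with heq | hmem
          · exact Or.inr (by rw [heq, hval])
          · exact Or.inl hmem
        · exact Or.inr (hpres _ hy)

-- ===== VERDICT (by name: the statement is the Claim_ definition above) =====
theorem f_spec : Claim_equal_f := by
  intro k _ hpre
  unfold Spec_f
  have halt : f_alt k = ((PySem.List.sorted (fAltChain2 k (PySem.Set.ofList [0]))
      (fun x => x) false).foldl
      (fun d x => d.insert x (if x = 0 then (1 : Int)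
        else d.getD (PySem.Int.floordiv x 2) 0 + d.getD (PySem.Int.floordiv x 3) 0))
      PySem.Dict.empty).getD k 0 := rfl
  set vals := fAltChain2 k (PySem.Set.ofList [0]) with hvals
  set L := PySem.List.sorted vals (fun x => x) false with hL
  have hmemS : ∀ x, x ∈ vals ↔ x = 0 ∨ x ∈ chainL2 k := by
    intro x
    rw [hvals, mem_fAltChain2]
    constructor
    · rintro (hx | hx)
      · exact Or.inl (by simpa [PySem.Set.mem_ofList] using hx)
      · exact Or.inr hx
    · rintro (rfl | hx)
      · exact Or.inl (by simp [PySem.Set.mem_ofList])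
      · exact Or.inr hx
  have hmemL : ∀ x, x ∈ L ↔ x = 0 ∨ x ∈ chainL2 k := by
    intro x; rw [hL, PySem.List.mem_sorted]; exact hmemS x
  have hnonneg : ∀ x ∈ L, 0 ≤ x := by
    intro x hx
    rcases (hmemL x).mp hx with rfl | hx
    · omega
    · exact le_of_lt (chainL2_pos k x hx)
  have hnodupL : L.Nodup := by
    have hnodup : vals.Nodup := by
      rw [hvals]
      exact nodup_fAltChain2 _ _ (by decide)
    rw [hL]
    exact ((PySem.List.sorted_perm vals (fun x => x) false).nodup_iff).mpr hnodup
  have hpwle : L.Pairwise (fun a b => a ≤ b) := by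
    rw [hL]; exact PySem.List.sorted_pairwise vals (fun x => x)
  have hpw : L.Pairwise (· < ·) := by
    have := hpwle.and hnodupL
    exact this.imp (fun hab => lt_of_le_of_ne hab.1 hab.2)
  have hclosed : ∀ x ∈ L, x ≠ 0 →
      (PySem.Int.floordiv x 2 ∈ L ∧ PySem.Int.floordiv x 2 < x) ∧
      (PySem.Int.floordiv x 3 ∈ L ∧ PySem.Int.floordiv x 3 < x) := by
    intro x hx hx0
    have hxpos : 0 < x := lt_of_le_of_ne (hnonneg x hx) (Ne.symm hx0)
    have hxc : x ∈ chainL2 k := ((hmemL x).mp hx).resolve_left hx0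
    constructor
    · constructor
      · rcases chainL2_closed2 k x hxc with hz | hmem
        · exact (hmemL _).mpr (Or.inl hz)
        · exact (hmemL _).mpr (Or.inr hmem)
      · rw [fd2_eq]; omega
    · constructor
      · rcases chainL2_closed3 k x hxc with hz | hmem
        · exact (hmemL _).mpr (Or.inl hz)
        · exact (hmemL _).mpr (Or.inr hmem)
      · rw [fd3_eq]; omega
  have hkL : k ∈ L := by
    refine (hmemL k).mpr ?_
    by_cases hk0 : k = 0
    · exact Or.inl hk0
    · exact Or.inr (chainL2_self k (lt_of_le_of_ne hpre (Ne.symm hk0)))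
  have hfold := fold_correct L PySem.Dict.empty hpw hnonneg
    (by
      intro x hx hx0
      rcases hclosed x hx hx0 with ⟨h2, h3⟩
      exact ⟨Or.inl h2, Or.inl h3⟩)
    k (Or.inl hkL)
  rw [halt, PySem.Dict.getD_eq_get?_getD, hfold]
  rfl
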